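-- pv_equiv track=rewrite | github.com/JB0925/Bites | Bite_223.py | get_octal_from_file_permission
-- ===== SOURCE A (Python) =====
-- def get_octal_from_file_permission(rwx: str) -> str:
--     """Receive a Unix file permission and convert it to
--        its octal representation.
--
--        In Unix you have user, group and other permissions,
--        each can have read (r), write (w), and execute (x)
--        permissions expressed by r, w and x.
--
--        Each has a number:
--        r = 4
--        w = 2
--        x = 1
--
--        So this leads to the following input/ outputs examples:
--        rw-r--r-- => 644 (user = 4 + 2, group = 4, other = 4)
--        rwxrwxrwx => 777 (user/group/other all have 4 + 2 + 1)
--        r-xr-xr-- => 554 (user/group = 4 + 1, other = 4)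
--     """
--     octals = {'r': 4, 'w': 2, 'x': 1, '-': 0}
--     chars = []
--     temp = []
--
--     for i in range(len(rwx)):
--         val = octals.get(rwx[i])
--         temp.append(val)
--         if len(temp) == 3:
--             chars.append(list(t for t in temp))
--             temp.clear()
--
--     return ''.join(str(sum(item)) for item in chars)
-- ===== SOURCE B (Python) =====
-- def get_octal_from_file_permission(rwx: str) -> str:
--     octals = {'r': 4, 'w': 2, 'x': 1, '-': 0}
--     return ''.join(str(octals.get(a) + octals.get(b) + octals.get(c))
--                    for a, b, c in zip(*[iter(rwx)] * 3))
-- ===== Notes on version B (the rewrite author's own statement) =====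
-- stated objective: simpler
-- what changed: Groups the string into consecutive triples directly with zip over one shared iterator and sums each triple in one expression, removing A's temp buffer, length-3 flush test and intermediate list of lists.
import Mathlib
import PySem

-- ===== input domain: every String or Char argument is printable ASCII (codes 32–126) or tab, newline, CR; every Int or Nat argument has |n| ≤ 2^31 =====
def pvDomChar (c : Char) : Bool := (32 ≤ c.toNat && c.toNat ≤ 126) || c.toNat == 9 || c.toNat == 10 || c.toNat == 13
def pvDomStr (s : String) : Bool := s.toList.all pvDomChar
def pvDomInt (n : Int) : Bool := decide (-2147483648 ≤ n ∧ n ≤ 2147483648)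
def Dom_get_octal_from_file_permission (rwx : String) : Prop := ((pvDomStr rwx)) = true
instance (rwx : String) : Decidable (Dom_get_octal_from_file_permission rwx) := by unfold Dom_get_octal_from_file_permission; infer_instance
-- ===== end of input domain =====

-- B replaces A's per-char temp buffer and flush-every-third-char logic by grouping the
-- string into consecutive triples directly (zip over one shared iterator) — objective: simpler.

-- ===== PORT A =====
-- octals = {'r': 4, 'w': 2, 'x': 1, '-': 0}
def pvOctalsA : PySem.Dict Char Int :=
  PySem.Dict.ofList [('r', 4), ('w', 2), ('x', 1), ('-', 0)]

-- Loop state: (chars, temp). 'val = octals.get(rwx[i])' is an Option Int; Python's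
-- 'sum(item)' raises TypeError when a None is in a complete triple — those inputs are
-- excluded by Pre_ below, so the '.getD 0' inside the final sum is never reached on Pre_.
def get_octal_from_file_permission (rwx : String) : String :=
  let st := rwx.toList.foldl
    (fun (s : List (List (Option Int)) × List (Option Int)) c =>
      let temp := s.2 ++ [pvOctalsA.get? c]
      if temp.length == 3 then (s.1 ++ [temp], []) else (s.1, temp))
    ([], [])
  PySem.Str.join "" (st.1.map (fun item => PySem.Int.toStr ((item.map (fun o => o.getD 0)).sum)))

-- ===== PORT B =====
def pvOctalsB : PySem.Dict Char Int :=
  PySem.Dict.ofList [('r', 4), ('w', 2), ('x', 1), ('-', 0)]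

-- 'for a, b, c in zip(*[iter(rwx)] * 3)': consume three chars at a time, dropping a short
-- tail; 'octals.get(a) + octals.get(b) + octals.get(c)' raises TypeError on a None — excluded
-- by Pre_, so '.getD 0' is never reached on Pre_.
def pvAltTriples : List Char → List String
  | a :: b :: c :: rest =>
      PySem.Int.toStr ((pvOctalsB.get? a).getD 0 + (pvOctalsB.get? b).getD 0 + (pvOctalsB.get? c).getD 0)
        :: pvAltTriples rest
  | _ => []

def get_octal_from_file_permission_alt (rwx : String) : String :=
  PySem.Str.join "" (pvAltTriples rwx.toList)

-- ===== PRECONDITION & SPEC =====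
-- Pre_ excludes exactly the inputs where Python A raises TypeError (None + int / sum over a
-- None): a character other than r, w, x or - occurring inside a complete triple, i.e. among the first
-- 3*(len//3) characters. Characters in a trailing short group never get summed, so they may
-- be anything.
def Pre_get_octal_from_file_permission (rwx : String) : Prop :=
  ((rwx.toList.take (3 * (rwx.toList.length / 3))).all
    (fun c => c == 'r' || c == 'w' || c == 'x' || c == '-')) = true
instance (rwx : String) : Decidable (Pre_get_octal_from_file_permission rwx) := by
  unfold Pre_get_octal_from_file_permission; infer_instance

def pvWitness_get_octal_from_file_permission : String := "rw-r--r--"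

def Spec_get_octal_from_file_permission (rwx : String) (out : String) : Prop := out = get_octal_from_file_permission_alt rwx
instance (rwx : String) (out : String) : Decidable (Spec_get_octal_from_file_permission rwx out) := by unfold Spec_get_octal_from_file_permission; infer_instance

-- ===== CLAIM (what is proved, stated in full; the proofs are below) =====
def Claim_equal_get_octal_from_file_permission : Prop := ∀ (rwx : String), Dom_get_octal_from_file_permission rwx → Pre_get_octal_from_file_permission rwx → Spec_get_octal_from_file_permission rwx (get_octal_from_file_permission rwx)

-- ===== LEMMAS AND PROOFS =====

-- The triple chunks A's loop accumulates into 'chars'.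
def pvChunksA : List Char → List (List (Option Int))
  | a :: b :: c :: rest => [pvOctalsA.get? a, pvOctalsA.get? b, pvOctalsA.get? c] :: pvChunksA rest
  | _ => []

-- The leftover 'temp' buffer at the end of A's loop.
def pvRemA : List Char → List (Option Int)
  | _ :: _ :: _ :: rest => pvRemA rest
  | l => l.map (fun c => pvOctalsA.get? c)

lemma pvFoldA (l : List Char) (acc : List (List (Option Int))) :
    l.foldl
      (fun (s : List (List (Option Int)) × List (Option Int)) c =>
        let temp := s.2 ++ [pvOctalsA.get? c]
        if temp.length == 3 then (s.1 ++ [temp], []) else (s.1, temp))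
      (acc, [])
    = (acc ++ pvChunksA l, pvRemA l) := by
  induction l using pvChunksA.induct generalizing acc with
  | case1 a b c rest ih =>
      rw [List.foldl_cons, List.foldl_cons, List.foldl_cons]
      show List.foldl _ (acc ++ [[pvOctalsA.get? a, pvOctalsA.get? b, pvOctalsA.get? c]], []) rest = _
      rw [ih]
      simp [pvChunksA, pvRemA]
  | case2 l h =>
      rcases l with _ | ⟨a, _ | ⟨b, _ | ⟨c, r⟩⟩⟩
      · simp [pvChunksA, pvRemA]
      · simp [List.foldl, pvChunksA, pvRemA]
      · simp [List.foldl, pvChunksA, pvRemA]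
      · exact absurd rfl (h a b c r)

lemma pvMapChunks (l : List Char) :
    (pvChunksA l).map (fun item => PySem.Int.toStr ((item.map (fun o => o.getD 0)).sum))
      = pvAltTriples l := by
  induction l using pvChunksA.induct with
  | case1 a b c rest ih =>
      have hAB : pvOctalsB = pvOctalsA := rfl
      simp only [pvChunksA, pvAltTriples, List.map_cons, ih, List.map_nil,
        List.sum_cons, List.sum_nil, hAB]
      congr 1
      congr 1
      ring
  | case2 l h =>
      rcases l with _ | ⟨a, _ | ⟨b, _ | ⟨c, r⟩⟩⟩
      · rfl
      · rfl
      · rfl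
      · exact absurd rfl (h a b c r)

-- ===== VERDICT (by name: the statement is the Claim_ definition above) =====
theorem get_octal_from_file_permission_spec : Claim_equal_get_octal_from_file_permission := by
  intro rwx _ _
  unfold Spec_get_octal_from_file_permission get_octal_from_file_permission
    get_octal_from_file_permission_alt
  simp only [pvFoldA, List.nil_append, pvMapChunks]
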